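-- pv_equiv track=rewrite | github.com/aws-samples/aws-identitycenter-codepipeline-auto-assignment | src/automation-code/permission-set-and-mapping-files-generator/auto-generate-permissionsets-mapping-files.py | validate_target_accounts
-- ===== SOURCE A (Python) =====
-- from typing import Dict, List
--
-- def validate_target_accounts(accounts: List[str], ou_data: Dict, logger=None) -> bool:
--     """
--     Validate that all accounts in a target group are properly assigned.
--     This is critical for OU-based assignments to ensure we don't accidentally
--     grant permissions to accounts that shouldn't have them.
--     """
--     """Validate if all accounts in an OU structure have the permission set assigned"""
--     if not accounts:
--         return False
--
--     all_accounts = set()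
--     for ou_info in ou_data.values():
--         all_accounts.update(ou_info['accounts'])
--
--     return all_accounts.issubset(set(accounts))
-- ===== SOURCE B (Python) =====
-- def validate_target_accounts(accounts, ou_data, logger=None):
--     if not accounts:
--         return False
--     refs = sorted({acc for ou_info in ou_data.values() for acc in ou_info['accounts']})
--     targ = sorted(set(accounts))
--     i = 0
--     for acc in refs:
--         while i < len(targ) and targ[i] < acc:
--             i += 1
--         if i == len(targ) or targ[i] != acc:
--             return False
--         i += 1
--     return True
-- ===== Notes on version B (the rewrite author's own statement) =====
-- stated objective: alternative
-- what changed: B replaces A's hash-set union + issubset with a sort-then-merge subset check: it sorts the deduplicated OU accounts and the deduplicated target accounts and verifies containment with a single two-pointer merge scan over the two sorted lists.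
import Mathlib
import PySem

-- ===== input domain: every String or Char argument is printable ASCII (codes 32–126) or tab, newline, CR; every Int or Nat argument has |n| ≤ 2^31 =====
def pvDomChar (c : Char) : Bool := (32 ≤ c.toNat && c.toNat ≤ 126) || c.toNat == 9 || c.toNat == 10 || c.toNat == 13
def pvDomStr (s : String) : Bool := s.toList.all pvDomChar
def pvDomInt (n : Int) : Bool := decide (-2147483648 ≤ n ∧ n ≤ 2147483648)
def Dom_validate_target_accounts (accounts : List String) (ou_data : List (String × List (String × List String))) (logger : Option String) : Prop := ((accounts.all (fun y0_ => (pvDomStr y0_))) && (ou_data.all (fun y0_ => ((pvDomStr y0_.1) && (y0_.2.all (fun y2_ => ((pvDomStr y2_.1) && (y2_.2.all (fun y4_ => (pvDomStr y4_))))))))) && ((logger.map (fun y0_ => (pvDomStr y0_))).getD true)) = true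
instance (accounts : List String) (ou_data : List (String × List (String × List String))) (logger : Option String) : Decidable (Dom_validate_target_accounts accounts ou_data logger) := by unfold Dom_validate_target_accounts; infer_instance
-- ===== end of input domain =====

-- B replaces A's hash-set union + issubset with a sort-then-merge two-pointer subset
-- check over the two sorted deduplicated lists (objective: alternative algorithm).


-- ===== PORT A =====
-- A: empty guard, then union all OU account lists into one set, then issubset against set(accounts).
-- ou_info['accounts'] is ported as getD with default []; Pre_ guarantees the key is present wherever A reaches the lookup.
def validate_target_accounts (accounts : List String) (ou_data : List (String × List (String × List String))) (logger : Option String) : Bool :=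
  if accounts = [] then false
  else
    let all_accounts := ((PySem.Dict.ofList ou_data).values).foldl
      (fun s ou_info => PySem.Set.update s ((PySem.Dict.ofList ou_info).getD "accounts" []))
      PySem.Set.empty
    PySem.Set.issubset all_accounts (PySem.Set.ofList accounts)

-- ===== PORT B =====
-- B: sort the deduplicated referenced accounts and the deduplicated target accounts,
-- then one two-pointer merge scan: the inner while (advance targ past elements < acc)
-- is pvAdvance, the outer for-loop with early return is pvMerge.
def pvAdvance (a : String) : List String → List String
  | [] => []
  | t :: ts => if t < a then pvAdvance a ts else t :: ts

def pvMerge : List String → List String → Bool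
  | [], _ => true
  | a :: rs, ts =>
    match pvAdvance a ts with
    | [] => false
    | t :: ts' => if t = a then pvMerge rs ts' else false

def validate_target_accounts_alt (accounts : List String) (ou_data : List (String × List (String × List String))) (logger : Option String) : Bool :=
  if accounts = [] then false
  else
    let refs := PySem.List.sorted (PySem.Set.ofList
      (((PySem.Dict.ofList ou_data).values).flatMap
        (fun ou_info => (PySem.Dict.ofList ou_info).getD "accounts" []))) (fun x => x) false
    let targ := PySem.List.sorted (PySem.Set.ofList accounts) (fun x => x) false
    pvMerge refs targ

-- ===== PRECONDITION & SPEC =====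
-- Pre_ excludes exactly the inputs where A raises KeyError: accounts nonempty and some OU value lacking the 'accounts' key.
def Pre_validate_target_accounts (accounts : List String) (ou_data : List (String × List (String × List String))) (logger : Option String) : Prop :=
  accounts = [] ∨ ∀ ou ∈ (PySem.Dict.ofList ou_data).values, (PySem.Dict.ofList ou).contains "accounts" = true
instance (accounts : List String) (ou_data : List (String × List (String × List String))) (logger : Option String) : Decidable (Pre_validate_target_accounts accounts ou_data logger) := by unfold Pre_validate_target_accounts; infer_instance
def pvWitness_validate_target_accounts : List String × (List (String × List (String × List String))) × Option String :=
  (["a", "b"], [("ou1", [("accounts", ["a"])])], none)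
def Spec_validate_target_accounts (accounts : List String) (ou_data : List (String × List (String × List String))) (logger : Option String) (out : Bool) : Prop := out = validate_target_accounts_alt accounts ou_data logger
instance (accounts : List String) (ou_data : List (String × List (String × List String))) (logger : Option String) (out : Bool) : Decidable (Spec_validate_target_accounts accounts ou_data logger out) := by unfold Spec_validate_target_accounts; infer_instance

-- ===== CLAIM (what is proved, stated in full; the proofs are below) =====
def Claim_equal_validate_target_accounts : Prop := ∀ (accounts : List String) (ou_data : List (String × List (String × List String))) (logger : Option String), Dom_validate_target_accounts accounts ou_data logger → Pre_validate_target_accounts accounts ou_data logger → Spec_validate_target_accounts accounts ou_data logger (validate_target_accounts accounts ou_data logger)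

-- ===== LEMMAS AND PROOFS =====

theorem mem_foldl_update {β : Type} {x : String} (f : β → List String) (ls : List β) (s0 : PySem.Set String) :
    x ∈ ls.foldl (fun s b => PySem.Set.update s (f b)) s0 ↔ x ∈ s0 ∨ ∃ b ∈ ls, x ∈ f b := by
  induction ls generalizing s0 with
  | nil => simp
  | cons l rest ih =>
    simp [List.foldl_cons, ih, PySem.Set.mem_update]
    tauto

-- On a strictly increasing list, pvAdvance keeps exactly the elements ≥ a.
theorem pvAdvance_spec (a : String) (ts : List String) (h : ts.Pairwise (· < ·)) :
    (pvAdvance a ts).Pairwise (· < ·)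
    ∧ (∀ x ∈ pvAdvance a ts, a ≤ x)
    ∧ (∀ x, a ≤ x → (x ∈ pvAdvance a ts ↔ x ∈ ts)) := by
  induction ts with
  | nil => simp [pvAdvance]
  | cons t ts ih =>
    rcases List.pairwise_cons.1 h with ⟨hlt, hts⟩
    by_cases hta : t < a
    · rw [show pvAdvance a (t :: ts) = pvAdvance a ts from by simp [pvAdvance, hta]]
      obtain ⟨p1, p2, p3⟩ := ih hts
      refine ⟨p1, p2, fun x hx => ?_⟩
      rw [p3 x hx]
      constructor
      · exact fun h' => List.mem_cons.2 (Or.inr h')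
      · intro h'
        rcases List.mem_cons.1 h' with rfl | h''
        · exact absurd hx (not_le.2 hta)
        · exact h''
    · rw [show pvAdvance a (t :: ts) = t :: ts from by simp [pvAdvance, hta]]
      refine ⟨h, fun x hx => ?_, fun x _ => Iff.rfl⟩
      rcases List.mem_cons.1 hx with rfl | hx
      · exact le_of_not_gt hta
      · exact le_of_lt (le_of_not_gt hta |>.trans_lt (hlt x hx))

-- On strictly increasing lists, pvMerge decides list containment.
theorem pvMerge_iff_subset (rs ts : List String) (hr : rs.Pairwise (· < ·))
    (ht : ts.Pairwise (· < ·)) :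
    pvMerge rs ts = true ↔ ∀ x ∈ rs, x ∈ ts := by
  induction rs generalizing ts with
  | nil => simp [pvMerge]
  | cons a rs ih =>
    rcases List.pairwise_cons.1 hr with ⟨halt, hrs⟩
    obtain ⟨hadvP, hadvGe, hadvMem⟩ := pvAdvance_spec a ts ht
    simp only [pvMerge]
    rcases hcase : pvAdvance a ts with _ | ⟨t, ts'⟩
    · simp only [Bool.false_eq_true, false_iff]
      intro hsub
      have : a ∈ pvAdvance a ts := (hadvMem a le_rfl).2 (hsub a (List.mem_cons_self ..))
      rw [hcase] at this; simp at this
    · rw [hcase] at hadvP hadvGe hadvMem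
      rcases List.pairwise_cons.1 hadvP with ⟨hlt', hts'⟩
      by_cases hta : t = a
      · subst hta
        simp only [if_true]
        rw [ih ts' hrs hts']
        constructor
        · intro hsub x hx
          rcases List.mem_cons.1 hx with rfl | hx
          · exact (hadvMem x le_rfl).1 (List.mem_cons_self ..)
          · exact (hadvMem x (le_of_lt (halt x hx))).1 (List.mem_cons.2 (Or.inr (hsub x hx)))
        · intro hsub x hx
          have hax : t < x := halt x hx
          have : x ∈ t :: ts' := (hadvMem x (le_of_lt hax)).2 (hsub x (List.mem_cons.2 (Or.inr hx)))
          rcases List.mem_cons.1 this with rfl | hx'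
          · exact absurd hax (lt_irrefl x)
          · exact hx'
      · simp only [if_neg hta, Bool.false_eq_true, false_iff]
        intro hsub
        have hmem : a ∈ t :: ts' := (hadvMem a le_rfl).2 (hsub a (List.mem_cons_self ..))
        have hat : a < t := lt_of_le_of_ne (hadvGe t (List.mem_cons_self ..)) (Ne.symm (by exact fun h => hta h))
        rcases List.mem_cons.1 hmem with rfl | hmem'
        · exact hta rfl
        · exact absurd (hat.trans (hlt' a hmem')) (lt_irrefl a)

theorem validate_target_accounts_spec : Claim_equal_validate_target_accounts := by
  intro accounts ou_data logger _ _
  unfold Spec_validate_target_accounts validate_target_accounts validate_target_accounts_alt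
  by_cases hacc : accounts = []
  · simp [hacc]
  · simp only [hacc, if_false]
    rw [Bool.eq_iff_iff, PySem.Set.issubset_iff,
        pvMerge_iff_subset _ _ (PySem.List.sorted_ofList_pairwise_lt _)
          (PySem.List.sorted_ofList_pairwise_lt _)]
    constructor
    · intro h x hx
      rw [PySem.List.mem_sorted, PySem.Set.mem_ofList, List.mem_flatMap] at hx
      rw [PySem.List.mem_sorted, PySem.Set.mem_ofList]
      rcases hx with ⟨ou, hou, hxo⟩
      have := h x ((mem_foldl_update _ _ _).2 (Or.inr ⟨ou, hou, hxo⟩))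
      rwa [PySem.Set.mem_ofList] at this
    · intro h x hx
      rcases (mem_foldl_update _ _ _).1 hx with h0 | ⟨ou, hou, hxl⟩
      · simp [PySem.Set.empty] at h0
      · have := h x (by
          rw [PySem.List.mem_sorted, PySem.Set.mem_ofList, List.mem_flatMap]
          exact ⟨ou, hou, hxl⟩)
        rw [PySem.List.mem_sorted, PySem.Set.mem_ofList] at this
        rwa [PySem.Set.mem_ofList]
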